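-- pv_equiv track=rewrite | github.com/kevinchen202008-cmyk/automated-tool-compliance-scanning | src/services/tool_service.py | parse_tool_names
-- ===== SOURCE A (Python) =====
-- def parse_tool_names(input_text: str) -> list[str]:
--     """
--     解析多个工具名（支持换行分隔或逗号分隔）
--
--     Args:
--         input_text: 输入文本（可以是多行或逗号分隔）
--
--     Returns:
--         list[str]: 解析后的工具名列表
--     """
--     if not input_text:
--         return []
--
--     # 先按换行分割
--     lines = input_text.split('\n')
--     tool_names = []
--
--     for line in lines:
--         line = line.strip()
--         if not line:
--             continue
--
--         # 如果行中包含逗号，按逗号分割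
--         if ',' in line:
--             parts = [part.strip() for part in line.split(',')]
--             tool_names.extend([p for p in parts if p])
--         else:
--             tool_names.append(line)
--
--     # 去重并保持顺序
--     seen = set()
--     unique_tools = []
--     for tool_name in tool_names:
--         normalized = tool_name.strip().lower()
--         if normalized and normalized not in seen:
--             seen.add(normalized)
--             unique_tools.append(tool_name.strip())
--
--     return unique_tools
-- ===== SOURCE B (Python) =====
-- def parse_tool_names(input_text: str) -> list[str]:
--     """Flat one-pass tokenization: treat ',' and '\n' uniformly as separators,
--     then dedup case-insensitively preserving order (empties die in the dedup guard)."""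
--     seen = set()
--     result = []
--     for token in input_text.replace(',', '\n').split('\n'):
--         name = token.strip()
--         key = name.lower()
--         if key and key not in seen:
--             seen.add(key)
--             result.append(name)
--     return result
-- ===== Notes on version B (the rewrite author's own statement) =====
-- stated objective: simpler
-- what changed: A's two-level parse (split into lines, branch on whether a line contains a comma, strip/filter per branch, then a second dedup pass) is replaced by one flat pass: rewrite commas to newlines, split once on newline, and do strip/lower/dedup in a single loop whose guard also drops empty tokens.
import Mathlib
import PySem

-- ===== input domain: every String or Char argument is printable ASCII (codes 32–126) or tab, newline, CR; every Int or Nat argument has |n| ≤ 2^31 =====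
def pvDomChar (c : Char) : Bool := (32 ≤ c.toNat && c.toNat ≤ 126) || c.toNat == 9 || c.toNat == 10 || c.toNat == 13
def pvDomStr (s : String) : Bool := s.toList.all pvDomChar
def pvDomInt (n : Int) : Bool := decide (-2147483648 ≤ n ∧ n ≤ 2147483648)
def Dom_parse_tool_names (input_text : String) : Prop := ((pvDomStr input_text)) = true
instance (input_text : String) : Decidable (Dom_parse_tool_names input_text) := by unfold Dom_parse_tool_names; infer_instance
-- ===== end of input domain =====

-- B replaces A's two-level parse (split lines, branch on comma, strip/filter, then dedup)
-- by one flat pass: map ',' to '\n', split once, and let the dedup guard drop empties (idiomatic; same cost).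


-- ===== PORT A =====
-- literal port of A; strings handled on the List Char side via PySem.Chars (exact on the ASCII domain)
-- loop body of A's first for-loop ('for line in lines')
def pvLineStep (acc : List (List Char)) (line0 : List Char) : List (List Char) :=
  let line := PySem.Chars.strip line0
  if line = [] then acc
  else if PySem.Chars.isIn [','] line = true then
    let parts := (PySem.Chars.splitOn line [',']).map PySem.Chars.strip
    acc ++ parts.filter (· ≠ [])
  else acc ++ [line]

-- loop body of A's dedup loop ('for tool_name in tool_names')
def pvDedupStepA (st : PySem.Set (List Char) × List (List Char)) (tool_name : List Char) :
    PySem.Set (List Char) × List (List Char) :=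
  let normalized := PySem.Chars.lower (PySem.Chars.strip tool_name)
  if normalized ≠ [] ∧ st.1.contains normalized = false then
    (st.1.add normalized, st.2 ++ [PySem.Chars.strip tool_name])
  else st

def parse_tool_names (input_text : String) : List String :=
  if input_text = "" then []
  else
    let lines := PySem.Chars.splitOn input_text.toList ['\n']
    let tool_names : List (List Char) := lines.foldl pvLineStep []
    let fin := tool_names.foldl pvDedupStepA (PySem.Set.empty, [])
    fin.2.map String.ofList

-- ===== PORT B =====
-- loop body of B's single dedup loop ('for token in …')
def pvDedupStepB (st : PySem.Set (List Char) × List (List Char)) (token : List Char) :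
    PySem.Set (List Char) × List (List Char) :=
  let name := PySem.Chars.strip token
  let key := PySem.Chars.lower name
  if key ≠ [] ∧ st.1.contains key = false then (st.1.add key, st.2 ++ [name]) else st

def parse_tool_names_alt (input_text : String) : List String :=
  let tokens := PySem.Chars.splitOn (PySem.Chars.replace input_text.toList [','] ['\n']) ['\n']
  let fin := tokens.foldl pvDedupStepB (PySem.Set.empty, [])
  fin.2.map String.ofList

-- ===== PRECONDITION & SPEC =====
def Spec_parse_tool_names (input_text : String) (out : List String) : Prop := out = parse_tool_names_alt input_text
instance (input_text : String) (out : List String) : Decidable (Spec_parse_tool_names input_text out) := by unfold Spec_parse_tool_names; infer_instance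

-- ===== CLAIM (what is proved, stated in full; the proofs are below) =====
def Claim_equal_parse_tool_names : Prop := ∀ (input_text : String), Dom_parse_tool_names input_text → Spec_parse_tool_names input_text (parse_tool_names input_text)

-- ===== LEMMAS AND PROOFS =====

-- split on a single character, structurally
def splitCh (sep : Char) : List Char → List (List Char)
  | [] => [[]]
  | c :: t => if c = sep then [] :: splitCh sep t
              else match splitCh sep t with
                   | r :: rs => (c :: r) :: rs
                   | [] => [[c]]

theorem splitCh_ne_nil (sep : Char) (cs : List Char) : splitCh sep cs ≠ [] := by
  cases cs with
  | nil => simp [splitCh]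
  | cons c t =>
    simp only [splitCh]
    split
    · simp
    · split <;> simp

theorem splitOn_go_eq (sep : Char) (fuel : Nat) (l cur : List Char) (acc : List (List Char))
    (h : l.length ≤ fuel) :
    PySem.Chars.splitOn.go [sep] fuel l cur acc
      = acc.reverse ++ (splitCh sep l).modifyHead (cur.reverse ++ ·) := by
  induction fuel generalizing l cur acc with
  | zero =>
    have : l = [] := List.eq_nil_of_length_eq_zero (Nat.le_zero.mp h)
    subst this
    simp [PySem.Chars.splitOn.go, splitCh]
  | succ n ih =>
    cases l with
    | nil => simp [PySem.Chars.splitOn.go, splitCh]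
    | cons c t =>
      rw [PySem.Chars.splitOn.go]
      by_cases hc : c = sep
      · subst hc
        have hp : [c].isPrefixOf (c :: t) = true := by simp [List.isPrefixOf]
        simp only [hp, if_true, List.length_cons, List.length_nil, List.drop_succ_cons, List.drop_zero]
        rw [ih t [] (cur.reverse :: acc) (by simpa using Nat.le_of_succ_le_succ h)]
        simp only [splitCh, if_pos rfl, List.modifyHead_cons, List.reverse_nil, List.nil_append, List.reverse_cons, List.append_assoc, List.singleton_append]
        rcases hr : splitCh c t with _ | ⟨r, rs⟩
        · exact absurd hr (splitCh_ne_nil c t)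
        · simp
      · have hp : [sep].isPrefixOf (c :: t) = false := by
          simp [List.isPrefixOf]; intro h'; exact (hc h'.symm).elim
        simp only [hp, Bool.false_eq_true, if_false]
        rw [ih t (c :: cur) acc (Nat.le_of_succ_le_succ h)]
        simp only [splitCh, if_neg hc]
        rcases hr : splitCh sep t with _ | ⟨r, rs⟩
        · exact absurd hr (splitCh_ne_nil sep t)
        · simp

theorem splitOn_single (sep : Char) (cs : List Char) :
    PySem.Chars.splitOn cs [sep] = splitCh sep cs := by
  rw [PySem.Chars.splitOn, splitOn_go_eq sep (cs.length + 1) cs [] [] (Nat.le_succ _)]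
  rcases h : splitCh sep cs with _ | ⟨r, rs⟩
  · exact absurd h (splitCh_ne_nil sep cs)
  · simp

theorem replace_go_eq (o n : Char) (fuel : Nat) (l acc : List Char) (h : l.length ≤ fuel) :
    PySem.Chars.replace.go [o] [n] fuel l acc
      = acc.reverse ++ l.map (fun c => if c = o then n else c) := by
  induction fuel generalizing l acc with
  | zero =>
    have : l = [] := List.eq_nil_of_length_eq_zero (Nat.le_zero.mp h)
    subst this; simp [PySem.Chars.replace.go]
  | succ m ih =>
    cases l with
    | nil => simp [PySem.Chars.replace.go]
    | cons c t =>
      rw [PySem.Chars.replace.go]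
      by_cases hc : c = o
      · subst hc
        have hp : [c].isPrefixOf (c :: t) = true := by simp [List.isPrefixOf]
        simp only [hp, if_true, List.length_cons, List.length_nil, List.drop_succ_cons, List.drop_zero]
        rw [ih t ([n].reverse ++ acc) (by simpa using Nat.le_of_succ_le_succ h)]
        simp
      · have hp : [o].isPrefixOf (c :: t) = false := by
          simp [List.isPrefixOf]; intro h'; exact (hc h'.symm).elim
        simp only [hp, Bool.false_eq_true, if_false]
        rw [ih t (c :: acc) (Nat.le_of_succ_le_succ h)]
        simp [hc]

theorem replace_single (o n : Char) (cs : List Char) :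
    PySem.Chars.replace cs [o] [n] = cs.map (fun c => if c = o then n else c) := by
  rw [PySem.Chars.replace]
  simp only [List.isEmpty_cons, Bool.false_eq_true, if_false]
  exact replace_go_eq o n cs.length cs [] le_rfl

theorem mem_dropWhile_of {p : Char → Bool} {c : Char} (hc : p c = false) :
    ∀ {l : List Char}, c ∈ l → c ∈ l.dropWhile p := by
  intro l hl
  induction l with
  | nil => simp at hl
  | cons a t ih =>
    by_cases ha : p a = true
    · rw [List.dropWhile_cons_of_pos ha]
      rcases hl with _ | h
      · rw [ha] at hc; simp at hc
      · exact ih (by assumption)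
    · rw [List.dropWhile_cons_of_neg ha]; exact hl

theorem mem_strip_of {c : Char} (hc : PySem.Chars.isspace c = false) {cs : List Char}
    (h : c ∈ cs) : c ∈ PySem.Chars.strip cs := by
  rw [PySem.Chars.strip, PySem.Chars.rstrip, PySem.Chars.lstrip]
  rw [List.mem_reverse]
  exact mem_dropWhile_of hc (by rw [List.mem_reverse]; exact mem_dropWhile_of hc h)

theorem strip_cons_space {a : Char} (ha : PySem.Chars.isspace a = true) (cs : List Char) :
    PySem.Chars.strip (a :: cs) = PySem.Chars.strip cs := by
  rw [PySem.Chars.strip, PySem.Chars.strip, PySem.Chars.lstrip, PySem.Chars.lstrip,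
    List.dropWhile_cons_of_pos ha]

theorem rstrip_concat_space {a : Char} (ha : PySem.Chars.isspace a = true) (cs : List Char) :
    PySem.Chars.rstrip (cs ++ [a]) = PySem.Chars.rstrip cs := by
  rw [PySem.Chars.rstrip, PySem.Chars.rstrip, List.reverse_append]
  simp only [List.reverse_cons, List.reverse_nil, List.nil_append, List.singleton_append]
  rw [List.dropWhile_cons_of_pos ha]

theorem rstrip_concat_nospace {a : Char} (ha : PySem.Chars.isspace a = false) (cs : List Char) :
    PySem.Chars.rstrip (cs ++ [a]) = cs ++ [a] := by
  rw [PySem.Chars.rstrip, List.reverse_append]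
  simp only [List.reverse_cons, List.reverse_nil, List.nil_append, List.singleton_append]
  rw [List.dropWhile_cons_of_neg (by simp [ha])]
  simp

theorem strip_concat_space {a : Char} (ha : PySem.Chars.isspace a = true) (cs : List Char) :
    PySem.Chars.strip (cs ++ [a]) = PySem.Chars.strip cs := by
  rw [PySem.Chars.strip, PySem.Chars.strip, PySem.Chars.lstrip, PySem.Chars.lstrip,
    List.dropWhile_append]
  by_cases h : (List.dropWhile PySem.Chars.isspace cs).isEmpty = true
  · rw [if_pos h]
    rw [List.isEmpty_iff] at h
    rw [h, List.dropWhile_cons_of_pos ha]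
    simp [PySem.Chars.rstrip]
  · rw [if_neg h]
    exact rstrip_concat_space ha _

theorem dropWhile_self_of_head {p : Char → Bool} {l : List Char}
    (h : List.dropWhile p l = l) : ∀ pre, pre <+: l → List.dropWhile p pre = pre := by
  intro pre hpre
  cases pre with
  | nil => rfl
  | cons b bs =>
    obtain ⟨t, ht⟩ := hpre
    have hb : p b = false := by
      by_contra hb'
      have hb : p b = true := by simpa using hb'
      rw [← ht] at h
      rw [List.cons_append, List.dropWhile_cons_of_pos hb] at h
      have hlen := congrArg List.length h
      have hle := List.length_dropWhile_le p (bs ++ t)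
      simp at hlen hle
      omega
    rw [List.dropWhile_cons_of_neg (by simp [hb])]

theorem rstrip_prefix (z : List Char) : PySem.Chars.rstrip z <+: z := by
  rw [PySem.Chars.rstrip]
  have := List.dropWhile_suffix (l := z.reverse) (p := PySem.Chars.isspace)
  have h2 := this.reverse
  simpa using h2

theorem strip_idem (cs : List Char) :
    PySem.Chars.strip (PySem.Chars.strip cs) = PySem.Chars.strip cs := by
  rw [PySem.Chars.strip, PySem.Chars.strip]
  have h1 : List.dropWhile PySem.Chars.isspace (PySem.Chars.lstrip cs) = PySem.Chars.lstrip cs := by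
    simpa [PySem.Chars.lstrip] using List.dropWhile_idempotent (l := cs) (p := PySem.Chars.isspace)
  have h2 : PySem.Chars.lstrip (PySem.Chars.rstrip (PySem.Chars.lstrip cs))
      = PySem.Chars.rstrip (PySem.Chars.lstrip cs) := by
    rw [PySem.Chars.lstrip]
    exact dropWhile_self_of_head h1 _ (rstrip_prefix _)
  rw [h2]
  rw [PySem.Chars.rstrip, PySem.Chars.rstrip]
  simp [List.dropWhile_idempotent]

theorem splitCh_not_mem {sep : Char} {cs : List Char} (h : sep ∉ cs) : splitCh sep cs = [cs] := by
  induction cs with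
  | nil => rfl
  | cons c t ih =>
    have hc : c ≠ sep := fun hc => h (hc ▸ List.mem_cons_self)
    have ht : sep ∉ t := fun ht => h (List.mem_cons_of_mem _ ht)
    simp only [splitCh, if_neg hc, ih ht]

-- append a character to the LAST piece
def appLast (c : Char) : List (List Char) → List (List Char)
  | [] => []
  | [r] => [r ++ [c]]
  | r :: rs => r :: appLast c rs

theorem splitCh_concat (sep : Char) (xs : List Char) (c : Char) :
    splitCh sep (xs ++ [c]) = if c = sep then splitCh sep xs ++ [[]]
      else appLast c (splitCh sep xs) := by
  induction xs with
  | nil =>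
    by_cases hc : c = sep <;> simp [splitCh, hc, appLast]
  | cons x t ih =>
    by_cases hx : x = sep
    · rw [List.cons_append]
      rw [show splitCh sep (x :: (t ++ [c])) = [] :: splitCh sep (t ++ [c]) by
        simp [splitCh, hx]]
      rw [show splitCh sep (x :: t) = [] :: splitCh sep t by simp [splitCh, hx]]
      rw [ih]
      by_cases hc : c = sep
      · simp [hc]
      · rw [if_neg hc, if_neg hc]
        rcases hr : splitCh sep t with _ | ⟨r, rs⟩
        · exact absurd hr (splitCh_ne_nil sep t)
        · simp [appLast]
    · rw [List.cons_append]
      simp only [splitCh, if_neg hx, ih]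
      by_cases hc : c = sep
      · rw [if_pos hc, if_pos hc]
        rcases hr : splitCh sep t with _ | ⟨r, rs⟩
        · exact absurd hr (splitCh_ne_nil sep t)
        · simp
      · rw [if_neg hc, if_neg hc]
        rcases hr : splitCh sep t with _ | ⟨r, rs⟩
        · exact absurd hr (splitCh_ne_nil sep t)
        · cases rs with
          | nil => simp [appLast]
          | cons r2 rs2 => simp [appLast]

theorem map_strip_appLast {a : Char} (ha : PySem.Chars.isspace a = true) (L : List (List Char)) :
    (appLast a L).map PySem.Chars.strip = L.map PySem.Chars.strip := by
  induction L with
  | nil => rfl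
  | cons r rs ih =>
    cases rs with
    | nil => simp [appLast, strip_concat_space ha]
    | cons r2 rs2 => simpa [appLast] using ih

theorem map_strip_splitCh_lstrip (cs : List Char) :
    (splitCh ',' (PySem.Chars.lstrip cs)).map PySem.Chars.strip
      = (splitCh ',' cs).map PySem.Chars.strip := by
  induction cs with
  | nil => rfl
  | cons c t ih =>
    by_cases hc : PySem.Chars.isspace c = true
    · have hcc : c ≠ ',' := by rintro rfl; simp [PySem.Chars.isspace] at hc
      rw [PySem.Chars.lstrip, List.dropWhile_cons_of_pos hc]
      rw [show List.dropWhile PySem.Chars.isspace t = PySem.Chars.lstrip t from rfl, ih]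
      rw [show splitCh ',' (c :: t) = match splitCh ',' t with
            | r :: rs => (c :: r) :: rs | [] => [[c]] by simp [splitCh, hcc]]
      rcases hr : splitCh ',' t with _ | ⟨r, rs⟩
      · exact absurd hr (splitCh_ne_nil _ t)
      · simp [strip_cons_space hc]
    · rw [PySem.Chars.lstrip, List.dropWhile_cons_of_neg hc]

theorem map_strip_splitCh_rstrip (cs : List Char) :
    (splitCh ',' (PySem.Chars.rstrip cs)).map PySem.Chars.strip
      = (splitCh ',' cs).map PySem.Chars.strip := by
  induction cs using List.reverseRecOn with
  | nil => rfl
  | append_singleton ys a ih =>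
    by_cases ha : PySem.Chars.isspace a = true
    · have hac : a ≠ ',' := by rintro rfl; simp [PySem.Chars.isspace] at ha
      rw [rstrip_concat_space ha, ih, splitCh_concat, if_neg hac, map_strip_appLast ha]
    · rw [rstrip_concat_nospace (by simpa using ha)]

theorem map_strip_splitCh_strip (cs : List Char) :
    (splitCh ',' (PySem.Chars.strip cs)).map PySem.Chars.strip
      = (splitCh ',' cs).map PySem.Chars.strip := by
  rw [PySem.Chars.strip, map_strip_splitCh_rstrip, map_strip_splitCh_lstrip]

theorem splitCh_cons_sep (sep : Char) (t : List Char) :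
    splitCh sep (sep :: t) = [] :: splitCh sep t := by simp [splitCh]

theorem splitCh_cons_ne {c sep : Char} (hc : c ≠ sep) (t : List Char) :
    splitCh sep (c :: t) = match splitCh sep t with
      | r :: rs => (c :: r) :: rs | [] => [[c]] := by simp [splitCh, hc]

theorem splitCh_map_comma (cs : List Char) :
    splitCh '\n' (cs.map (fun c => if c = ',' then '\n' else c))
      = (splitCh '\n' cs).flatMap (splitCh ',') := by
  induction cs with
  | nil => simp [splitCh]
  | cons c t ih =>
    rw [List.map_cons]
    by_cases hc : c = ','
    · rw [if_pos hc, splitCh_cons_sep, ih, hc]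
      rw [splitCh_cons_ne (by decide : (',' : Char) ≠ '\n')]
      rcases hr : splitCh '\n' t with _ | ⟨r, rs⟩
      · exact absurd hr (splitCh_ne_nil _ t)
      · rw [show (match r :: rs with
              | u :: us => ((',' :: u) :: us : List (List Char)) | [] => [[',']])
            = (',' :: r) :: rs from rfl]
        rw [List.flatMap_cons (x := (',' :: r)), splitCh_cons_sep]
        simp
    · rw [if_neg hc]
      by_cases hn : c = '\n'
      · rw [hn, splitCh_cons_sep, ih, splitCh_cons_sep, List.flatMap_cons]
        simp [splitCh]
      · rw [splitCh_cons_ne hn, ih, splitCh_cons_ne hn]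
        rcases hr : splitCh '\n' t with _ | ⟨r, rs⟩
        · exact absurd hr (splitCh_ne_nil _ t)
        · rcases hq : splitCh ',' r with _ | ⟨q, qs⟩
          · exact absurd hq (splitCh_ne_nil _ r)
          · rw [List.flatMap_cons, hq, List.flatMap_cons, splitCh_cons_ne hc, hq]
            simp

theorem isIn_singleton_iff (c : Char) (l : List Char) :
    PySem.Chars.isIn [c] l = true ↔ c ∈ l := by
  rw [PySem.Chars.isIn_iff_infix]
  constructor
  · intro h; exact h.mem List.mem_cons_self
  · intro h
    obtain ⟨s, t, rfl⟩ := List.append_of_mem h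
    exact ⟨s, t, by simp⟩

theorem comma_not_space : PySem.Chars.isspace ',' = false := by decide

theorem pvLineStep_eq (acc : List (List Char)) (line0 : List Char) :
    pvLineStep acc line0 = acc ++ ((splitCh ',' line0).map PySem.Chars.strip).filter (· ≠ []) := by
  rw [pvLineStep]
  simp only
  by_cases h0 : PySem.Chars.strip line0 = []
  · rw [if_pos h0]
    have hnc : ',' ∉ line0 := fun hm => by
      have := mem_strip_of comma_not_space hm
      rw [h0] at this; simp at this
    rw [splitCh_not_mem hnc]
    simp [h0]
  · rw [if_neg h0]
    by_cases hin : PySem.Chars.isIn [','] (PySem.Chars.strip line0) = true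
    · rw [if_pos hin, splitOn_single, map_strip_splitCh_strip]
    · rw [if_neg hin]
      have hnc : ',' ∉ line0 := fun hm => hin ((isIn_singleton_iff _ _).mpr (mem_strip_of comma_not_space hm))
      rw [splitCh_not_mem hnc]
      simp [h0]

theorem filter_map_flatMap {α : Type} (p : List α → Bool) (g : List α → List α)
    (h : List (List α)) (gg : List α → List (List α)) :
    h.flatMap (fun l => ((gg l).map g).filter p) = ((h.flatMap gg).map g).filter p := by
  induction h with
  | nil => rfl
  | cons x t ih => simp [List.filter_append, ih]

theorem lower_nil : PySem.Chars.lower [] = [] := rfl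

theorem dedup_eq (l : List (List Char)) :
    ∀ st : PySem.Set (List Char) × List (List Char),
    l.foldl pvDedupStepB st
      = ((l.map PySem.Chars.strip).filter (· ≠ [])).foldl pvDedupStepA st := by
  induction l with
  | nil => intro st; rfl
  | cons tok t ih =>
    intro st
    rw [List.map_cons, List.foldl_cons, List.filter_cons]
    by_cases hname : PySem.Chars.strip tok = []
    · have h1 : pvDedupStepB st tok = st := by
        rw [pvDedupStepB]
        simp [hname, lower_nil]
      rw [h1, if_neg (by simp [hname]), ih]
    · rw [if_pos (by simpa using hname), List.foldl_cons]
      have h2 : pvDedupStepA st (PySem.Chars.strip tok) = pvDedupStepB st tok := by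
        rw [pvDedupStepA, pvDedupStepB]
        simp only [strip_idem]
      rw [h2, ih]

theorem foldl_lineStep (l : List (List Char)) :
    ∀ a : List (List Char), l.foldl pvLineStep a
      = a ++ l.flatMap (fun l0 => ((splitCh ',' l0).map PySem.Chars.strip).filter (· ≠ [])) := by
  induction l with
  | nil => simp
  | cons x t ih =>
    intro a
    rw [List.foldl_cons, pvLineStep_eq, ih, List.flatMap_cons, List.append_assoc]

-- ===== VERDICT (by name: the statement is the Claim_ definition above) =====
theorem parse_tool_names_spec : Claim_equal_parse_tool_names := by
  intro s _
  unfold Spec_parse_tool_names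
  rw [parse_tool_names, parse_tool_names_alt]
  by_cases hs : s = ""
  · subst hs
    rw [if_pos rfl]
    rfl
  · rw [if_neg hs]
    simp only
    rw [replace_single, splitOn_single, splitOn_single, splitCh_map_comma]
    rw [dedup_eq, foldl_lineStep, List.nil_append]
    rw [filter_map_flatMap]
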